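-- pv_equiv track=rewrite | github.com/LuchianovAntoniu-Aureliu/GrundlagenderProgrammierungRepository | Labor2/main.py | numere_repetate
-- ===== SOURCE A (Python) =====
-- def numere_repetate(lista):
--     lista1 = lista[:]
--
--     i = 0
--
--     while i < len(lista1):
--         element = lista1[i]
--
--         if lista1.count(element) > 1:
--             del lista1[i]
--         else:
--             i += 1
--
--     return lista1
-- ===== SOURCE B (Python) =====
-- def numere_repetate(lista):
--     last = {}
--     for i, x in enumerate(lista):
--         last[x] = i
--     return [x for i, x in enumerate(lista) if last[x] == i]
-- ===== Notes on version B (the rewrite author's own statement) =====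
-- stated objective: faster
-- what changed: Replaced the quadratic while-loop with repeated .count scans and in-place del by a two-pass index table: one pass records each value's last index in a dict, a second pass keeps exactly the elements sitting at their last index.
import Mathlib
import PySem

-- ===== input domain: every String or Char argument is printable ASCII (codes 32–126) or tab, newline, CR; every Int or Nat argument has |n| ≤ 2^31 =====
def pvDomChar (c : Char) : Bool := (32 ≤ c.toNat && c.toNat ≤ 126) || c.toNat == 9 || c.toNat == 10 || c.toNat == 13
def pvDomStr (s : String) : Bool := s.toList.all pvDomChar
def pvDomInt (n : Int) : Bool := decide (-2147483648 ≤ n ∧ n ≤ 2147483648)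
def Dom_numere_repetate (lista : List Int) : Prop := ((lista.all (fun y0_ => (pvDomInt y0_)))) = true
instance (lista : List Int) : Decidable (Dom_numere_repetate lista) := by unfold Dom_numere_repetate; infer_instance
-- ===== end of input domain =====

-- B replaces A's quadratic count-and-delete while loop by a last-index dict plus a filtering pass (asymptotically faster, measured).


-- ===== PORT A =====
-- the while loop: inspect lista1[i]; delete it if it occurs more than once, else advance i
def numereLoopA (l : List Int) (i : Nat) : List Int :=
  if h : i < l.length then
    let element := l[i]
    if l.count element > 1 then
      numereLoopA (l.eraseIdx i) i
    else
      numereLoopA l (i + 1)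
  else l
termination_by l.length - i
decreasing_by
  · simp only [List.length_eraseIdx_of_lt h]; omega
  · omega

def numere_repetate (lista : List Int) : List Int :=
  numereLoopA lista 0

-- ===== PORT B =====
def numere_repetate_alt (lista : List Int) : List Int :=
  let last := (PySem.List.enumerate lista).foldl (fun d p => d.insert p.2 p.1) PySem.Dict.empty
  (((PySem.List.enumerate lista).filter (fun p => last.get? p.2 == some p.1)).map (·.2))

-- ===== PRECONDITION & SPEC =====
def Spec_numere_repetate (lista : List Int) (out : List Int) : Prop := out = numere_repetate_alt lista
instance (lista : List Int) (out : List Int) : Decidable (Spec_numere_repetate lista out) := by unfold Spec_numere_repetate; infer_instance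

-- ===== CLAIM (what is proved, stated in full; the proofs are below) =====
def Claim_equal_numere_repetate : Prop := ∀ (lista : List Int), Dom_numere_repetate lista → Spec_numere_repetate lista (numere_repetate lista)

-- ===== LEMMAS AND PROOFS =====

-- common characterisation: keep the LAST occurrence of each element
def keepLast : List Int → List Int
  | [] => []
  | x :: xs => if x ∈ xs then keepLast xs else x :: keepLast xs

-- B side: looking up a key absent from the enumerated tail leaves the seed dict untouched
theorem get?_fold_not_mem (ws : List Int) (s : Int) (d : PySem.Dict Int Int) (k : Int)
    (h : k ∉ ws) :
    ((PySem.List.enumerate ws s).foldl (fun d p => d.insert p.2 p.1) d).get? k = d.get? k := by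
  induction ws generalizing s d with
  | nil => simp [PySem.List.enumerate_nil]
  | cons y ys ih =>
    simp only [PySem.List.enumerate_cons, List.foldl_cons]
    rw [ih _ _ (by simp at h; exact h.2), PySem.Dict.get?_insert]
    simp at h
    simp [h.1]

-- B side: a key occurring in the tail gets bound to some index ≥ the start
theorem get?_fold_mem (ws : List Int) (s : Int) (d : PySem.Dict Int Int) (k : Int)
    (h : k ∈ ws) :
    ∃ j : Nat, ((PySem.List.enumerate ws s).foldl (fun d p => d.insert p.2 p.1) d).get? k = some (s + j) := by
  induction ws generalizing s d with
  | nil => simp at h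
  | cons y ys ih =>
    simp only [PySem.List.enumerate_cons, List.foldl_cons]
    by_cases hmem : k ∈ ys
    · obtain ⟨j, hj⟩ := ih (s + 1) (d.insert y s) hmem
      exact ⟨j + 1, by rw [hj]; congr 1; push_cast; ring⟩
    · have hk : k = y := by simp at h; tauto
      subst hk
      refine ⟨0, ?_⟩
      rw [get?_fold_not_mem _ _ _ _ hmem, PySem.Dict.get?_insert]
      simp

-- B side: the filter pass over the enumerated list with the last-index dict is keepLast
theorem alt_loop (ws : List Int) (s : Int) (d : PySem.Dict Int Int) :
    (((PySem.List.enumerate ws s).filter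
        (fun p => ((PySem.List.enumerate ws s).foldl (fun d p => d.insert p.2 p.1) d).get? p.2 == some p.1)).map (·.2))
      = keepLast ws := by
  induction ws generalizing s d with
  | nil => simp [PySem.List.enumerate_nil, keepLast]
  | cons x xs ih =>
    simp only [PySem.List.enumerate_cons, List.foldl_cons, List.filter_cons]
    by_cases hmem : x ∈ xs
    · obtain ⟨j, hj⟩ := get?_fold_mem xs (s + 1) (d.insert x s) x hmem
      have hne : ¬ (((PySem.List.enumerate xs (s + 1)).foldl (fun d p => d.insert p.2 p.1) (d.insert x s)).get? x == some s) = true := by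
        rw [hj]; simp; omega
      simp only [hne, keepLast, hmem, if_true]
      exact ih (s + 1) (d.insert x s)
    · have heq : (((PySem.List.enumerate xs (s + 1)).foldl (fun d p => d.insert p.2 p.1) (d.insert x s)).get? x == some s) = true := by
        rw [get?_fold_not_mem _ _ _ _ hmem, PySem.Dict.get?_insert]; simp
      simp only [heq, if_true, List.map_cons, keepLast, hmem, if_false]
      exact congrArg (x :: ·) (ih (s + 1) (d.insert x s))

theorem alt_eq_keepLast (l : List Int) : numere_repetate_alt l = keepLast l := by
  unfold numere_repetate_alt
  exact alt_loop l 0 PySem.Dict.empty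

-- A side: while the prefix before i is duplicate-free in l, the loop yields prefix ++ keepLast (suffix)
theorem loopA_spec (l : List Int) (i : Nat)
    (hinv : ∀ j : Nat, j < i → ∀ hj : j < l.length, l.count l[j] = 1) :
    numereLoopA l i = l.take i ++ keepLast (l.drop i) := by
  induction l, i using numereLoopA.induct with
  | case1 l i h element hcnt ih =>
    -- delete branch: l[i] occurs more than once, hence again after i
    have hcnt' : List.count l[i] l > 1 := hcnt
    have hdrop : l.drop i = l[i] :: l.drop (i + 1) := List.drop_eq_getElem_cons h
    have hxpre : l[i] ∉ l.take i := by
      intro hmem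
      obtain ⟨j, hj, hjl⟩ := List.getElem_of_mem hmem
      have hj1 : j < i := by simp [List.length_take] at hj; omega
      have hj2 : j < l.length := by omega
      have hjl' : l[j] = l[i] := by simpa using hjl
      have hc1 : List.count l[j] l = 1 := hinv j hj1 hj2
      have hcc : List.count l[j] l = List.count l[i] l :=
        congrArg (fun z => List.count z l) hjl'
      omega
    have hnotpre : (l.take i).count l[i] = 0 := List.count_eq_zero.mpr hxpre
    have hsplit : ∀ y : Int, (l.take i).count y + (l.drop i).count y = l.count y := by
      intro y; rw [← List.count_append, List.take_append_drop]
    have hsplit := hsplit l[i]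
    have hlater : l[i] ∈ l.drop (i + 1) := by
      have h2 : (l.drop i).count l[i] > 1 := by omega
      rw [hdrop, List.count_cons_self] at h2
      exact List.count_pos_iff.mp (by omega)
    have herase : l.eraseIdx i = l.take i ++ l.drop (i + 1) :=
      List.eraseIdx_eq_take_drop_succ l i
    have hlen : (l.take i).length = i := by simp [List.length_take]; omega
    have hinv' : ∀ j : Nat, j < i → ∀ hj : j < (l.eraseIdx i).length,
        (l.eraseIdx i).count (l.eraseIdx i)[j] = 1 := by
      intro j hji hj'
      have hj2 : j < l.length := by omega
      have hgetj : (l.eraseIdx i)[j] = l[j] := by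
        rw [List.getElem_of_eq herase hj']
        rw [List.getElem_append_left (by omega)]
        exact List.getElem_take
      rw [hgetj]
      have hc1 : List.count l[j] l = 1 := hinv j hji hj2
      have hne : l[j] ≠ l[i] := by
        intro hcontra
        have hcc : List.count l[j] l = List.count l[i] l :=
          congrArg (fun z => List.count z l) hcontra
        omega
      have hctail : List.count l[j] (l.drop i) =
          (if l[i] = l[j] then 1 else 0) + List.count l[j] (l.drop (i + 1)) := by
        rw [hdrop, List.count_cons]
        by_cases hxy : l[i] = l[j] <;> simp [hxy] <;> omega
      have hsplit2 : (l.take i).count l[j] + (l.drop i).count l[j] = l.count l[j] := by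
        rw [← List.count_append, List.take_append_drop]
      have : (l.eraseIdx i).count l[j]
          = (l.take i).count l[j] + (l.drop (i + 1)).count l[j] := by
        rw [herase]; exact List.count_append ..
      simp [hne.symm] at hctail
      omega
    rw [numereLoopA]
    simp only [dif_pos h]
    rw [if_pos hcnt, ih hinv', herase]
    rw [List.take_append_of_le_length (by omega), List.take_of_length_le (by omega),
      List.drop_append_of_le_length (by omega), List.drop_of_length_le (by omega),
      List.nil_append, hdrop]
    simp [keepLast, hlater]
  | case2 l i h element hcnt ih =>
    -- keep branch: l[i] is unique in l
    have hcnt' : ¬ List.count l[i] l > 1 := hcnt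
    have hdrop : l.drop i = l[i] :: l.drop (i + 1) := List.drop_eq_getElem_cons h
    have hone : List.count l[i] l = 1 := by
      have hpos : 0 < l.count l[i] := List.count_pos_iff.mpr (List.getElem_mem h)
      omega
    have hnotlater : l[i] ∉ l.drop (i + 1) := by
      intro hmem
      have h1 : 0 < (l.drop (i + 1)).count l[i] := List.count_pos_iff.mpr hmem
      have hsplit : (l.take i).count l[i] + (l.drop i).count l[i] = l.count l[i] := by
        rw [← List.count_append, List.take_append_drop]
      rw [hdrop, List.count_cons_self] at hsplit
      omega
    have hinv' : ∀ j : Nat, j < i + 1 → ∀ hj : j < l.length, l.count l[j] = 1 := by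
      intro j hji hj'
      rcases Nat.lt_or_ge j i with hlt | hge
      · exact hinv j hlt hj'
      · have hj : j = i := by omega
        subst hj
        exact hone
    rw [numereLoopA]
    simp only [dif_pos h]
    rw [if_neg hcnt, ih hinv']
    rw [show l.take (i + 1) = l.take i ++ [l[i]] from by
      rw [List.take_add_one]; simp [List.getElem?_eq_getElem h]]
    rw [hdrop]
    have hkl : keepLast (l[i] :: l.drop (i + 1)) = l[i] :: keepLast (l.drop (i + 1)) := by
      simp [keepLast, hnotlater]
    rw [hkl, List.append_assoc, List.singleton_append]
  | case3 l i h =>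
    have hlen : l.length ≤ i := by omega
    rw [numereLoopA, dif_neg h]
    simp [List.take_of_length_le hlen, List.drop_of_length_le hlen, keepLast]

-- ===== VERDICT (by name: the statement is the Claim_ definition above) =====
theorem numere_repetate_spec : Claim_equal_numere_repetate := by
  intro lista _
  unfold Spec_numere_repetate numere_repetate
  rw [alt_eq_keepLast, loopA_spec lista 0 (by omega)]
  simp
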